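-- pv_equiv track=rewrite | github.com/maltepoo/algorithm | PROGRAMMERS/[3차] 방금그곡.py | solution
-- ===== SOURCE A (Python) =====
-- def change_melody(m):
--     m = m.replace('C#', 'c').replace('D#', 'd').replace('F#', 'f').replace('G#', 'g').replace('A#', 'a')
--     return m
--
-- def generate_music(melody, time):
--     if len(melody) < time:
--         melody = melody * (time // len(melody) + 1)
--     return melody[:time]
--
-- def solution(m, musicinfos):
--     answer = ''
--     res = []
--     m = change_melody(m)
--     for i in range(len(musicinfos)):
--         musicinfo = musicinfos[i]
--         st, ed, title, score = musicinfo.split(",")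
--         score = change_melody(score)
--         playtime = (int(ed[0:2]) - int(st[0:2])) * 60 + (int(ed[3:]) - int(st[3:]))
--
--         played = generate_music(score, playtime)
--         if m in played:
--             res.append((i, title, playtime))
--
--     if res:
--         res.sort(key=lambda x: x[2], reverse=True)  # 재생시간 우선순위 정렬
--         answer = res[0]  # 최대 재생시간
--         for i in range(len(res)):
--             if res[i][2] >= answer[2] and res[i][0] < answer[0]:
--                 answer = res[i]
--         return answer[1]
--     else:
--         return "(None)"
-- ===== SOURCE B (Python) =====
-- def solution(m, musicinfos):
--     def flat(s):
--         return s.replace('C#', 'c').replace('D#', 'd').replace('F#', 'f').replace('G#', 'g').replace('A#', 'a')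
--
--     target = flat(m)
--     best = None  # (playtime, title) of the current best match
--     for info in musicinfos:
--         st, ed, title, score = info.split(',')
--         score = flat(score)
--         playtime = (int(ed[:2]) - int(st[:2])) * 60 + (int(ed[3:]) - int(st[3:]))
--         if len(score) < playtime:
--             score = score * (playtime // len(score) + 1)
--         played = score[:playtime]
--         if target in played and (best is None or playtime > best[0]):
--             best = (playtime, title)
--     return best[1] if best else '(None)'
-- ===== Notes on version B (the rewrite author's own statement) =====
-- stated objective: simpler
-- what changed: Dropped the collected res list, the descending sort and the rescan loop entirely: B keeps a single running (best_playtime, best_title) pair updated with a strictly-greater comparison, which preserves the earliest-index-among-maximum tie-break in one pass.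
import Mathlib
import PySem

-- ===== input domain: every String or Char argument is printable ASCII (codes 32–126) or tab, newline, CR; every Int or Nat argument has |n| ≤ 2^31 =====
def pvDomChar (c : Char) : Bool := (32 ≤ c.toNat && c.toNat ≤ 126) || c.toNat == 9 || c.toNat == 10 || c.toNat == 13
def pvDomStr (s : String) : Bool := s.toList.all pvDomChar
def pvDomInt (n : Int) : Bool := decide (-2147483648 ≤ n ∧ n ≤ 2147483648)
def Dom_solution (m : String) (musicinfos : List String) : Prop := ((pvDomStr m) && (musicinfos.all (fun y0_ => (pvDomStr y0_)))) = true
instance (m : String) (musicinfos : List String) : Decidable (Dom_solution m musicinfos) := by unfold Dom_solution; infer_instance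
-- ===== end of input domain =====

-- B replaces A's collect-all / sort-descending / rescan aggregation by a single running
-- (best_playtime, best_title) maximum with a strictly-greater update; same matching loop, same results.

-- ===== PORT A =====
def change_melody (m : String) : String :=
  PySem.Str.replace (PySem.Str.replace (PySem.Str.replace (PySem.Str.replace
    (PySem.Str.replace m "C#" "c") "D#" "d") "F#" "f") "G#" "g") "A#" "a"

-- `melody * k` is ported with PySem.List.pyRepeat on the code points (exact);
-- `none` is the ZeroDivisionError of `time // len(melody)` when melody is empty.
def generate_music? (melody : String) (time : Int) : Option String :=
  if PySem.Str.len melody < time then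
    if PySem.Str.len melody = 0 then none
    else some (PySem.Str.slice
      (String.ofList (PySem.List.pyRepeat melody.toList (PySem.Int.floordiv time (PySem.Str.len melody) + 1)))
      none (some time))
  else some (PySem.Str.slice melody none (some time))

-- one iteration of A's `for i in range(len(musicinfos))` loop; `none` = the Python raise
-- (ValueError of the 4-way unpack / int(), or the ZeroDivisionError above)
def solutionStep (m : String) (acc : Option (List (Int × String × Int))) (p : Int × String) :
    Option (List (Int × String × Int)) :=
  acc.bind fun res =>
    match PySem.Str.split? p.2 "," with
    | some [st, ed, title, score0] =>
      let score := change_melody score0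
      match PySem.Int.ofStr? (PySem.Str.slice ed (some 0) (some 2)),
            PySem.Int.ofStr? (PySem.Str.slice st (some 0) (some 2)),
            PySem.Int.ofStr? (PySem.Str.slice ed (some 3)),
            PySem.Int.ofStr? (PySem.Str.slice st (some 3)) with
      | some eh, some sh, some em, some sm =>
        let playtime := (eh - sh) * 60 + (em - sm)
        (generate_music? score playtime).map (fun played =>
          if PySem.Str.isIn m played then res ++ [(p.1, title, playtime)] else res)
      | _, _, _, _ => none
    | _ => none

def solution (m : String) (musicinfos : List String) : String :=
  let m := change_melody m
  match (PySem.List.enumerate musicinfos).foldl (solutionStep m) (some []) with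
  | none => ""          -- Python raised here; excluded by Pre_solution
  | some [] => "(None)"
  | some (r :: rs) =>
    match PySem.List.sorted (r :: rs) (fun x => x.2.2) true with
    | [] => ""          -- unreachable: sorted of a nonempty list is nonempty
    | a :: t =>
      -- `answer = res[0]; for i in range(len(res)): if res[i][2] >= answer[2] and res[i][0] < answer[0]: ...`
      let answer := (a :: t).foldl
        (fun ans x => if decide (ans.2.2 ≤ x.2.2) && decide (x.1 < ans.1) then x else ans) a
      answer.2.1

-- ===== PORT B =====
def pvFlat (s : String) : String :=
  PySem.Str.replace (PySem.Str.replace (PySem.Str.replace (PySem.Str.replace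
    (PySem.Str.replace s "C#" "c") "D#" "d") "F#" "f") "G#" "g") "A#" "a"

-- one iteration of B's loop over musicinfos; state = Optional best (playtime, title);
-- outer `none` = the Python raise
def pvBestStep (target : String) (acc : Option (Option (Int × String))) (info : String) :
    Option (Option (Int × String)) :=
  acc.bind fun best =>
    match PySem.Str.split? info "," with
    | some [st, ed, title, score0] =>
      let score := pvFlat score0
      match PySem.Int.ofStr? (PySem.Str.slice ed none (some 2)),
            PySem.Int.ofStr? (PySem.Str.slice st none (some 2)),
            PySem.Int.ofStr? (PySem.Str.slice ed (some 3)),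
            PySem.Int.ofStr? (PySem.Str.slice st (some 3)) with
      | some eh, some sh, some em, some sm =>
        let playtime := (eh - sh) * 60 + (em - sm)
        match (if PySem.Str.len score < playtime then
                 if PySem.Str.len score = 0 then none
                 else some (String.ofList (PySem.List.pyRepeat score.toList
                        (PySem.Int.floordiv playtime (PySem.Str.len score) + 1)))
               else some score) with
        | none => none
        | some score' =>
          let played := PySem.Str.slice score' none (some playtime)
          some (if PySem.Str.isIn target played &&
                   (match best with | none => true | some (bp, _) => decide (bp < playtime))
                then some (playtime, title) else best)
      | _, _, _, _ => none
    | _ => none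

def solution_alt (m : String) (musicinfos : List String) : String :=
  let target := pvFlat m
  match musicinfos.foldl (pvBestStep target) (some none) with
  | none => ""          -- Python raised here; excluded by Pre_solution
  | some none => "(None)"
  | some (some (_, title)) => title

-- ===== PRECONDITION & SPEC =====
-- Pre_'s own copy of the C#/D#/... flattening (kept separate from both ports on purpose)
def pvNorm (s : String) : String :=
  PySem.Str.replace (PySem.Str.replace (PySem.Str.replace (PySem.Str.replace
    (PySem.Str.replace s "C#" "c") "D#" "d") "F#" "f") "G#" "g") "A#" "a"

-- one musicinfo is well-formed: it splits into exactly 4 comma-fields, the four int() calls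
-- succeed, and the flattened score is nonempty unless the playtime is ≤ its length
-- (otherwise Python raises ValueError / ZeroDivisionError)
def pvInfoOK (info : String) : Bool :=
  match PySem.Str.split? info "," with
  | some [st, ed, _, score0] =>
    match PySem.Int.ofStr? (PySem.Str.slice ed none (some 2)),
          PySem.Int.ofStr? (PySem.Str.slice st none (some 2)),
          PySem.Int.ofStr? (PySem.Str.slice ed (some 3)),
          PySem.Int.ofStr? (PySem.Str.slice st (some 3)) with
    | some eh, some sh, some em, some sm =>
      decide (0 < PySem.Str.len (pvNorm score0)) ||
      decide ((eh - sh) * 60 + (em - sm) ≤ PySem.Str.len (pvNorm score0))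
    | _, _, _, _ => false
  | _ => false

-- Pre_ excludes exactly the inputs on which the Python A raises (malformed musicinfo entries)
def Pre_solution (m : String) (musicinfos : List String) : Prop :=
  musicinfos.all pvInfoOK = true
instance (m : String) (musicinfos : List String) : Decidable (Pre_solution m musicinfos) := by
  unfold Pre_solution; infer_instance

def pvWitness_solution : String × List String :=
  ("ABCDEFG", ["12:00,12:14,HELLO,C#DEFGAB", "13:00,13:05,WORLD,ABCDEF"])

def Spec_solution (m : String) (musicinfos : List String) (out : String) : Prop := out = solution_alt m musicinfos
instance (m : String) (musicinfos : List String) (out : String) : Decidable (Spec_solution m musicinfos out) := by unfold Spec_solution; infer_instance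

-- ===== CLAIM (what is proved, stated in full; the proofs are below) =====
def Claim_equal_solution : Prop := ∀ (m : String) (musicinfos : List String), Dom_solution m musicinfos → Pre_solution m musicinfos → Spec_solution m musicinfos (solution m musicinfos)

-- ===== LEMMAS AND PROOFS =====

-- the two flattening helpers and Pre_'s copy are the same chain of replaces
theorem pvFlat_eq_change (s : String) : pvFlat s = change_melody s := rfl
theorem pvNorm_eq_change (s : String) : pvNorm s = change_melody s := rfl

theorem opt_some_bind {α β : Type} (a : α) (f : α → Option β) : (some a).bind f = f a := rfl

theorem str_slice_zero (s : String) (b : Option Int) :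
    PySem.Str.slice s (some 0) b = PySem.Str.slice s none b := by
  simp [PySem.Str.slice]

-- the per-item computation both loops share: (title, playtime, does m occur in played)
def pvItem? (target : String) (info : String) : Option (String × Int × Bool) :=
  match PySem.Str.split? info "," with
  | some [st, ed, title, score0] =>
    match PySem.Int.ofStr? (PySem.Str.slice ed none (some 2)),
          PySem.Int.ofStr? (PySem.Str.slice st none (some 2)),
          PySem.Int.ofStr? (PySem.Str.slice ed (some 3)),
          PySem.Int.ofStr? (PySem.Str.slice st (some 3)) with
    | some eh, some sh, some em, some sm =>
      match generate_music? (change_melody score0) ((eh - sh) * 60 + (em - sm)) with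
      | none => none
      | some played => some (title, (eh - sh) * 60 + (em - sm), PySem.Str.isIn target played)
    | _, _, _, _ => none
  | _ => none

theorem stepA_eq (m : String) (res : List (Int × String × Int)) (p : Int × String) :
    solutionStep m (some res) p =
      (pvItem? m p.2).map (fun r => if r.2.2 then res ++ [(p.1, r.1, r.2.1)] else res) := by
  unfold solutionStep pvItem?
  simp only [opt_some_bind, str_slice_zero]
  cases hs : PySem.Str.split? p.2 "," with
  | none => rfl
  | some l =>
    cases l with
    | nil => rfl
    | cons st l =>
    cases l with
    | nil => rfl
    | cons ed l =>
    cases l with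
    | nil => rfl
    | cons title l =>
    cases l with
    | nil => rfl
    | cons sc l =>
    cases l with
    | cons x' l => rfl
    | nil =>
      dsimp only
      cases h1 : PySem.Int.ofStr? (PySem.Str.slice ed none (some 2)) with
      | none => rfl
      | some eh =>
      cases h2 : PySem.Int.ofStr? (PySem.Str.slice st none (some 2)) with
      | none => rfl
      | some sh =>
      cases h3 : PySem.Int.ofStr? (PySem.Str.slice ed (some 3)) with
      | none => rfl
      | some em =>
      cases h4 : PySem.Int.ofStr? (PySem.Str.slice st (some 3)) with
      | none => rfl
      | some sm =>
      dsimp only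
      cases hg : generate_music? (change_melody sc) ((eh - sh) * 60 + (em - sm)) with
      | none => rfl
      | some played => rfl

theorem stepB_eq (target : String) (best : Option (Int × String)) (info : String) :
    pvBestStep target (some best) info =
      (pvItem? target info).map (fun r =>
        if r.2.2 && (match best with | none => true | some bp => decide (bp.1 < r.2.1))
        then some (r.2.1, r.1) else best) := by
  unfold pvBestStep pvItem?
  simp only [opt_some_bind, pvFlat_eq_change]
  cases hs : PySem.Str.split? info "," with
  | none => rfl
  | some l =>
    cases l with
    | nil => rfl
    | cons st l =>
    cases l with
    | nil => rfl
    | cons ed l =>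
    cases l with
    | nil => rfl
    | cons title l =>
    cases l with
    | nil => rfl
    | cons sc l =>
    cases l with
    | cons x' l => rfl
    | nil =>
      dsimp only
      cases h1 : PySem.Int.ofStr? (PySem.Str.slice ed none (some 2)) with
      | none => rfl
      | some eh =>
      cases h2 : PySem.Int.ofStr? (PySem.Str.slice st none (some 2)) with
      | none => rfl
      | some sh =>
      cases h3 : PySem.Int.ofStr? (PySem.Str.slice ed (some 3)) with
      | none => rfl
      | some em =>
      cases h4 : PySem.Int.ofStr? (PySem.Str.slice st (some 3)) with
      | none => rfl
      | some sm =>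
      dsimp only
      unfold generate_music?
      rcases best with _ | ⟨bp, bt⟩ <;>
      · by_cases hlt : PySem.Str.len (change_melody sc) < (eh - sh) * 60 + (em - sm)
        · by_cases hz : PySem.Str.len (change_melody sc) = 0
          · simp only [if_pos hlt, if_pos hz]; rfl
          · simp only [if_pos hlt, if_neg hz]; rfl
        · simp only [if_neg hlt]; rfl

theorem pvItem?_some (target info : String) (h : pvInfoOK info = true) :
    ∃ t p b, pvItem? target info = some (t, p, b) := by
  unfold pvInfoOK at h
  unfold pvItem?
  cases hs : PySem.Str.split? info "," with
  | none => rw [hs] at h; exact Bool.noConfusion h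
  | some l =>
    rw [hs] at h
    cases l with
    | nil => exact Bool.noConfusion h
    | cons st l =>
    cases l with
    | nil => exact Bool.noConfusion h
    | cons ed l =>
    cases l with
    | nil => exact Bool.noConfusion h
    | cons title l =>
    cases l with
    | nil => exact Bool.noConfusion h
    | cons sc l =>
    cases l with
    | cons x' l => exact Bool.noConfusion h
    | nil =>
      dsimp only at h ⊢
      cases h1 : PySem.Int.ofStr? (PySem.Str.slice ed none (some 2)) with
      | none => rw [h1] at h; exact Bool.noConfusion h
      | some eh =>
      rw [h1] at h
      cases h2 : PySem.Int.ofStr? (PySem.Str.slice st none (some 2)) with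
      | none => rw [h2] at h; exact Bool.noConfusion h
      | some sh =>
      rw [h2] at h
      cases h3 : PySem.Int.ofStr? (PySem.Str.slice ed (some 3)) with
      | none => rw [h3] at h; exact Bool.noConfusion h
      | some em =>
      rw [h3] at h
      cases h4 : PySem.Int.ofStr? (PySem.Str.slice st (some 3)) with
      | none => rw [h4] at h; exact Bool.noConfusion h
      | some sm =>
      rw [h4] at h
      dsimp only at h ⊢
      simp only [pvNorm_eq_change, Bool.or_eq_true, decide_eq_true_eq] at h
      unfold generate_music?
      by_cases hlt : PySem.Str.len (change_melody sc) < (eh - sh) * 60 + (em - sm)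
      · have hz : ¬ PySem.Str.len (change_melody sc) = 0 := by omega
        simp only [if_pos hlt, if_neg hz]
        exact ⟨_, _, _, rfl⟩
      · simp only [if_neg hlt]
        exact ⟨_, _, _, rfl⟩

-- B's running best, as a function of the list A collects
def runBest (res : List (Int × String × Int)) : Option (Int × String) :=
  res.foldl (fun b r =>
    if (match b with | none => true | some bp => decide (bp.1 < r.2.2))
    then some (r.2.2, r.2.1) else b) none

theorem runBest_append (res : List (Int × String × Int)) (x : Int × String × Int) :
    runBest (res ++ [x]) =
      if (match runBest res with | none => true | some bp => decide (bp.1 < x.2.2))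
      then some (x.2.2, x.2.1) else runBest res := by
  simp [runBest, List.foldl_append]

-- the heart of the equivalence: running both loops in lockstep
theorem loop_eq (m : String) (infos : List String) :
    ∀ (i : Int) (res : List (Int × String × Int)),
      (∀ x ∈ infos, pvInfoOK x = true) →
      (∀ r ∈ res, r.1 < i) →
      res.Pairwise (fun a b => a.1 < b.1) →
      ∃ res2,
        (PySem.List.enumerate infos i).foldl (solutionStep m) (some res) = some res2 ∧
        infos.foldl (pvBestStep m) (some (runBest res)) = some (runBest res2) ∧
        res2.Pairwise (fun a b => a.1 < b.1) := by
  induction infos with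
  | nil =>
    intro i res _ _ hp
    exact ⟨res, rfl, rfl, hp⟩
  | cons x t ih =>
    intro i res hall hbound hp
    obtain ⟨t0, p0, b0, hit⟩ := pvItem?_some m x (hall x (by simp))
    have hallt : ∀ y ∈ t, pvInfoOK y = true := fun y hy => hall y (by simp [hy])
    have henum : PySem.List.enumerate (x :: t) i = (i, x) :: PySem.List.enumerate t (i + 1) := rfl
    cases b0 with
    | false =>
      have hbound' : ∀ r ∈ res, r.1 < i + 1 := fun r hr => by have := hbound r hr; omega
      obtain ⟨res2, h1, h2, h3⟩ := ih (i + 1) res hallt hbound' hp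
      refine ⟨res2, ?_, ?_, h3⟩
      · rw [henum, List.foldl_cons]
        have hA1 : solutionStep m (some res) (i, x) = some res := by
          rw [stepA_eq]
          rw [show ((i, x) : Int × String).2 = x from rfl, hit]
          rfl
        rw [hA1]; exact h1
      · rw [List.foldl_cons]
        have hB1 : pvBestStep m (some (runBest res)) x = some (runBest res) := by
          rw [stepB_eq, hit]; simp
        rw [hB1]; exact h2
    | true =>
      have hbound' : ∀ r ∈ res ++ [(i, t0, p0)], r.1 < i + 1 := by
        intro r hr
        rcases List.mem_append.mp hr with hr | hr
        · have := hbound r hr; omega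
        · simp only [List.mem_singleton] at hr; subst hr; omega
      have hp' : (res ++ [(i, t0, p0)]).Pairwise (fun a b => a.1 < b.1) := by
        rw [List.pairwise_append]
        refine ⟨hp, List.pairwise_singleton _ _, ?_⟩
        intro a ha b hb
        simp only [List.mem_singleton] at hb
        subst hb
        exact hbound a ha
      obtain ⟨res2, h1, h2, h3⟩ := ih (i + 1) (res ++ [(i, t0, p0)]) hallt hbound' hp'
      refine ⟨res2, ?_, ?_, h3⟩
      · rw [henum, List.foldl_cons]
        have hA1 : solutionStep m (some res) (i, x) = some (res ++ [(i, t0, p0)]) := by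
          rw [stepA_eq]
          rw [show ((i, x) : Int × String).2 = x from rfl, hit]
          rfl
        rw [hA1]; exact h1
      · rw [List.foldl_cons]
        have hB1 : pvBestStep m (some (runBest res)) x =
            some (runBest (res ++ [(i, t0, p0)])) := by
          rw [stepB_eq, hit, runBest_append]
          simp
        rw [hB1]; exact h2

-- runBest projected back to full entries: the FIRST entry of maximal playtime
def pvFirst (res : List (Int × String × Int)) : Option (Int × String × Int) :=
  res.foldl (fun b r =>
    match b with
    | none => some r
    | some br => if decide (br.2.2 < r.2.2) then some r else b) none

theorem runBest_eq_pvFirst_aux (res : List (Int × String × Int))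
    (s : Option (Int × String × Int)) :
    res.foldl (fun b r =>
        if (match b with | none => true | some bp => decide (bp.1 < r.2.2))
        then some (r.2.2, r.2.1) else b) (s.map (fun r => (r.2.2, r.2.1))) =
      (res.foldl (fun b r =>
        match b with
        | none => some r
        | some br => if decide (br.2.2 < r.2.2) then some r else b) s).map (fun r => (r.2.2, r.2.1)) := by
  induction res generalizing s with
  | nil => rfl
  | cons r t ih =>
    simp only [List.foldl_cons]
    rw [← ih]
    congr 1
    cases s with
    | none => rfl
    | some br =>
      simp only [Option.map_some]
      by_cases hc : br.2.2 < r.2.2 <;> simp [hc]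

theorem runBest_eq_pvFirst (res : List (Int × String × Int)) :
    runBest res = (pvFirst res).map (fun r => (r.2.2, r.2.1)) := by
  have h := runBest_eq_pvFirst_aux res none
  simpa [runBest, pvFirst] using h

theorem pvFirst_aux (t : List (Int × String × Int)) :
    ∀ (b : Int × String × Int),
      ∃ c, t.foldl (fun b r =>
            match b with
            | none => some r
            | some br => if decide (br.2.2 < r.2.2) then some r else b) (some b) = some c ∧
        (c = b ∨ (c ∈ t ∧ b.2.2 < c.2.2)) ∧ (∀ x ∈ t, x.2.2 ≤ c.2.2) := by
  induction t with
  | nil => intro b; exact ⟨b, rfl, Or.inl rfl, by simp⟩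
  | cons r t ih =>
    intro b
    by_cases hc : b.2.2 < r.2.2
    · obtain ⟨c, h1, h2, h3⟩ := ih r
      have hrc : r.2.2 ≤ c.2.2 := by
        rcases h2 with h2 | ⟨_, hlt⟩
        · rw [h2]
        · exact le_of_lt hlt
      refine ⟨c, by simpa [hc] using h1, ?_, ?_⟩
      · rcases h2 with h2 | ⟨hm, hlt⟩
        · exact Or.inr ⟨by simp [h2], by rw [h2]; exact hc⟩
        · exact Or.inr ⟨by simp [hm], by omega⟩
      · intro y hy
        rcases List.mem_cons.mp hy with hy | hy
        · subst hy; exact hrc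
        · exact h3 y hy
    · obtain ⟨c, h1, h2, h3⟩ := ih b
      have hbc : b.2.2 ≤ c.2.2 := by
        rcases h2 with h2 | ⟨_, hlt⟩
        · rw [h2]
        · exact le_of_lt hlt
      refine ⟨c, by simpa [hc] using h1, ?_, ?_⟩
      · rcases h2 with h2 | ⟨hm, hlt⟩
        · exact Or.inl h2
        · exact Or.inr ⟨by simp [hm], hlt⟩
      · intro y hy
        rcases List.mem_cons.mp hy with hy | hy
        · subst hy; omega
        · exact h3 y hy

theorem pvFirst_decomp_aux (t : List (Int × String × Int)) :
    ∀ (b c : Int × String × Int),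
      t.foldl (fun b r =>
          match b with
          | none => some r
          | some br => if decide (br.2.2 < r.2.2) then some r else b) (some b) = some c →
      ∃ l1 l2, b :: t = l1 ++ c :: l2 ∧ ∀ x ∈ l1, x.2.2 < c.2.2 := by
  induction t with
  | nil =>
    intro b c h
    simp only [List.foldl_nil, Option.some_inj] at h
    exact ⟨[], [], by simp [h], by simp⟩
  | cons r t ih =>
    intro b c h
    by_cases hc : b.2.2 < r.2.2
    · rw [List.foldl_cons] at h
      simp only [hc, decide_true, if_pos] at h
      obtain ⟨l1, l2, he, hlt⟩ := ih r c h
      have hrc : r.2.2 ≤ c.2.2 := by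
        obtain ⟨c', h1, h2, _⟩ := pvFirst_aux t r
        rw [h] at h1
        have hcc : c = c' := by cases h1; rfl
        subst hcc
        rcases h2 with h2 | ⟨_, hltx⟩
        · rw [h2]
        · exact le_of_lt hltx
      refine ⟨b :: l1, l2, by simp [he], ?_⟩
      intro y hy
      rcases List.mem_cons.mp hy with hy | hy
      · subst hy; omega
      · exact hlt y hy
    · rw [List.foldl_cons] at h
      simp only [hc, decide_false] at h
      rw [if_neg (by simp)] at h
      obtain ⟨l1, l2, he, hlt⟩ := ih b c h
      cases l1 with
      | nil =>
        simp only [List.nil_append, List.cons.injEq] at he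
        exact ⟨[], r :: t, by simp [he.1], by simp⟩
      | cons y l1' =>
        simp only [List.cons_append, List.cons.injEq] at he
        obtain ⟨hy, ht⟩ := he
        refine ⟨b :: r :: l1', l2, by simp [ht], ?_⟩
        intro z hz
        have hblt : b.2.2 < c.2.2 := by
          have := hlt y (by simp)
          rw [← hy] at this
          exact this
        rcases List.mem_cons.mp hz with hz | hz
        · subst hz; exact hblt
        rcases List.mem_cons.mp hz with hz | hz
        · subst hz; omega
        · exact hlt z (by simp [hz])

-- A's rescan loop characterised: starting from an entry of maximal playtime M,
-- the fold keeps playtime M, stays inside {ans} ∪ L, never increases the index,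
-- and ends with an index ≤ that of every entry of playtime M in L
theorem rescan_char (M : Int) (L : List (Int × String × Int)) :
    ∀ (ans : Int × String × Int),
      ans.2.2 = M → (∀ x ∈ L, x.2.2 ≤ M) →
      (L.foldl (fun a x => if decide (a.2.2 ≤ x.2.2) && decide (x.1 < a.1) then x else a) ans).2.2 = M ∧
      ((L.foldl (fun a x => if decide (a.2.2 ≤ x.2.2) && decide (x.1 < a.1) then x else a) ans) = ans ∨
        (L.foldl (fun a x => if decide (a.2.2 ≤ x.2.2) && decide (x.1 < a.1) then x else a) ans) ∈ L) ∧
      (L.foldl (fun a x => if decide (a.2.2 ≤ x.2.2) && decide (x.1 < a.1) then x else a) ans).1 ≤ ans.1 ∧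
      (∀ x ∈ L, x.2.2 = M →
        (L.foldl (fun a x => if decide (a.2.2 ≤ x.2.2) && decide (x.1 < a.1) then x else a) ans).1 ≤ x.1) := by
  induction L with
  | nil =>
    intro ans h1 _
    exact ⟨h1, Or.inl rfl, le_refl _, by simp⟩
  | cons x t ih =>
    intro ans h1 h2
    by_cases hcond : ans.2.2 ≤ x.2.2 ∧ x.1 < ans.1
    · have hstep : (if decide (ans.2.2 ≤ x.2.2) && decide (x.1 < ans.1) then x else ans) = x := by
        simp [hcond.1, hcond.2]
      have hxM : x.2.2 = M := by
        have := h2 x (by simp); omega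
      obtain ⟨g1, g2, g3, g4⟩ := ih x hxM (fun y hy => h2 y (by simp [hy]))
      simp only [List.foldl_cons, hstep]
      refine ⟨g1, ?_, ?_, ?_⟩
      · rcases g2 with g2 | g2
        · exact Or.inr (by rw [g2]; exact List.mem_cons_self ..)
        · exact Or.inr (List.mem_cons_of_mem x g2)
      · omega
      · intro y hy hyM
        rcases List.mem_cons.mp hy with hy | hy
        · subst hy; exact g3
        · exact g4 y hy hyM
    · have hstep : (if decide (ans.2.2 ≤ x.2.2) && decide (x.1 < ans.1) then x else ans) = ans := by
        rcases not_and_or.mp hcond with h | h <;> simp [h]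
      obtain ⟨g1, g2, g3, g4⟩ := ih ans h1 (fun y hy => h2 y (by simp [hy]))
      simp only [List.foldl_cons, hstep]
      refine ⟨g1, ?_, g3, ?_⟩
      · rcases g2 with g2 | g2
        · exact Or.inl g2
        · exact Or.inr (List.mem_cons_of_mem x g2)
      · intro y hy hyM
        rcases List.mem_cons.mp hy with hy | hy
        · subst hy
          have hle : ans.2.2 ≤ y.2.2 := by omega
          have hnl : ¬ y.1 < ans.1 := fun hl => hcond ⟨hle, hl⟩
          omega
        · exact g4 y hy hyM

-- ===== VERDICT (by name: the statement is the Claim_ definition above) =====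
theorem solution_spec : Claim_equal_solution := by
  intro m musicinfos _hdom hpre
  unfold Spec_solution
  simp only [solution, solution_alt, pvFlat_eq_change]
  have hall : ∀ x ∈ musicinfos, pvInfoOK x = true := by
    simpa [Pre_solution, List.all_eq_true] using hpre
  obtain ⟨res2, hA, hB, hp2⟩ := loop_eq (change_melody m) musicinfos 0 [] hall (by simp) (by simp)
  rw [show runBest ([] : List (Int × String × Int)) = none from rfl] at hB
  rw [hA, hB]
  cases res2 with
  | nil => rfl
  | cons r rs =>
    obtain ⟨c, hc, hcmem, hcmax⟩ := pvFirst_aux rs r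
    have hfirst : pvFirst (r :: rs) = some c := by
      simpa [pvFirst] using hc
    have hrbv : runBest (r :: rs) = some (c.2.2, c.2.1) := by
      rw [runBest_eq_pvFirst, hfirst]; rfl
    rw [hrbv]
    dsimp only
    have hcmem' : c ∈ r :: rs := by
      rcases hcmem with h | ⟨h, _⟩
      · simp [h]
      · simp [h]
    have hcmax' : ∀ x ∈ r :: rs, x.2.2 ≤ c.2.2 := by
      intro x hx
      rcases List.mem_cons.mp hx with hx | hx
      · subst hx
        rcases hcmem with h | ⟨_, hlt⟩
        · rw [h]
        · exact le_of_lt hlt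
      · exact hcmax x hx
    cases hS : PySem.List.sorted (r :: rs) (fun x => x.2.2) true with
    | nil => exact absurd ((PySem.List.sorted_eq_nil_iff _ _ _).mp hS) (by simp)
    | cons a tS =>
      dsimp only
      have hmaxa : ∀ y ∈ r :: rs, y.2.2 ≤ a.2.2 := fun y hy =>
        PySem.List.key_head_sorted_rev_ge _ _ hS y hy
      have hmemS : ∀ y : Int × String × Int, y ∈ a :: tS ↔ y ∈ r :: rs := by
        intro y
        rw [← hS]
        exact PySem.List.mem_sorted _ _ _ y
      obtain ⟨g1, g2, g3, g4⟩ := rescan_char a.2.2 (a :: tS) a rfl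
        (fun y hy => hmaxa y ((hmemS y).mp hy))
      set out := (a :: tS).foldl
        (fun a x => if decide (a.2.2 ≤ x.2.2) && decide (x.1 < a.1) then x else a) a with hout
      have houtmem : out ∈ r :: rs := by
        rcases g2 with h | h
        · exact (hmemS out).mp (h ▸ (by simp : a ∈ a :: tS))
        · exact (hmemS out).mp h
      have hcM : c.2.2 = a.2.2 := by
        have ha1 : c.2.2 ≤ a.2.2 := hmaxa c hcmem'
        have ha3 : out.2.2 ≤ c.2.2 := hcmax' out houtmem
        omega
      obtain ⟨l1, l2, hdec, hl1⟩ := pvFirst_decomp_aux rs r c hc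
      have houtc : out = c := by
        rw [hdec] at houtmem
        rcases List.mem_append.mp houtmem with h | h
        · have := hl1 out h; omega
        · rcases List.mem_cons.mp h with h | h
          · exact h
          · exfalso
            have hpdec : (l1 ++ c :: l2).Pairwise (fun a b => a.1 < b.1) := hdec ▸ hp2
            rw [List.pairwise_append] at hpdec
            have hclt : c.1 < out.1 := (List.pairwise_cons.mp hpdec.2.1).1 out h
            have hmin : out.1 ≤ c.1 :=
              g4 c ((hmemS c).mpr hcmem') hcM
            omega
      show out.2.1 = c.2.1
      rw [houtc]
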